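-- pv_equiv track=rewrite | github.com/softdevmps/vs-systembase | systems/mapeo/cordoba-dataset/src/normalize.py | infer_tipo_via
-- ===== SOURCE A (Python) =====
-- def infer_tipo_via(nombre_norm: str) -> str:
--     if not nombre_norm:
--         return "OTRO"
--     for pref, tipo in [
--         ("AVENIDA ", "AVENIDA"),
--         ("PASAJE ", "PASAJE"),
--         ("BOULEVARD ", "BOULEVARD"),
--         ("CAMINO ", "CAMINO"),
--         ("RUTA NACIONAL ", "RUTA"),
--         ("RUTA PROVINCIAL ", "RUTA"),
--         ("RUTA ", "RUTA"),
--         ("DIAGONAL ", "DIAGONAL"),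
--         ("CALLE ", "CALLE"),
--     ]:
--         if nombre_norm.startswith(pref):
--             return tipo
--     return "CALLE"
-- ===== SOURCE B (Python) =====
-- _TIPO_BY_FIRST_WORD = {
--     "AVENIDA": "AVENIDA",
--     "PASAJE": "PASAJE",
--     "BOULEVARD": "BOULEVARD",
--     "CAMINO": "CAMINO",
--     "RUTA": "RUTA",
--     "DIAGONAL": "DIAGONAL",
--     "CALLE": "CALLE",
-- }
--
--
-- def infer_tipo_via(nombre_norm: str) -> str:
--     if not nombre_norm:
--         return "OTRO"
--     i = nombre_norm.find(" ")
--     if i == -1: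
--         return "CALLE"
--     return _TIPO_BY_FIRST_WORD.get(nombre_norm[:i], "CALLE")
-- ===== Notes on version B (the rewrite author's own statement) =====
-- stated objective: idiomatic
-- what changed: A scans an ordered list of nine space-terminated prefixes with startswith; B extracts the first space-delimited word once (find + slice) and looks it up in a seven-entry dict falling back to the default street type.
import Mathlib
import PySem

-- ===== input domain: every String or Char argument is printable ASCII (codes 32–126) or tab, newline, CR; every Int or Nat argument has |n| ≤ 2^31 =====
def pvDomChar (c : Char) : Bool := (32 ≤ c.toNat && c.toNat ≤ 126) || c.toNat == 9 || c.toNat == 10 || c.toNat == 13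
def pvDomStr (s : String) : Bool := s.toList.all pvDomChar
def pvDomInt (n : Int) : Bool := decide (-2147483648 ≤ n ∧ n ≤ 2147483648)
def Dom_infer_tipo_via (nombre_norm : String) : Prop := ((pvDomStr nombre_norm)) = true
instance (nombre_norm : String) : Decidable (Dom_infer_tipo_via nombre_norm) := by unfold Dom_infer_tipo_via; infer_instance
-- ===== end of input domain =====

-- B replaces A's ordered prefix scan by one first-word extraction plus a dict lookup (idiomatic; same cost).

-- ===== PORT A =====
-- the literal prefix table A iterates over, in A's order
def pvPrefixes : List (String × String) :=
  [("AVENIDA ", "AVENIDA"),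
   ("PASAJE ", "PASAJE"),
   ("BOULEVARD ", "BOULEVARD"),
   ("CAMINO ", "CAMINO"),
   ("RUTA NACIONAL ", "RUTA"),
   ("RUTA PROVINCIAL ", "RUTA"),
   ("RUTA ", "RUTA"),
   ("DIAGONAL ", "DIAGONAL"),
   ("CALLE ", "CALLE")]

-- A's for-loop: first matching prefix wins, fall through to "CALLE"
def pvScanA (s : String) : List (String × String) → String
  | [] => "CALLE"
  | (pref, tipo) :: rest => if PySem.Str.startswith s pref then tipo else pvScanA s rest

def infer_tipo_via (nombre_norm : String) : String :=
  if PySem.Str.len nombre_norm = 0 then "OTRO"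
  else pvScanA nombre_norm pvPrefixes

-- ===== PORT B =====
def pvTipoByFirstWord : PySem.Dict String String :=
  PySem.Dict.ofList
    [("AVENIDA", "AVENIDA"), ("PASAJE", "PASAJE"), ("BOULEVARD", "BOULEVARD"),
     ("CAMINO", "CAMINO"), ("RUTA", "RUTA"), ("DIAGONAL", "DIAGONAL"), ("CALLE", "CALLE")]

def infer_tipo_via_alt (nombre_norm : String) : String :=
  if PySem.Str.len nombre_norm = 0 then "OTRO"
  else
    let i := PySem.Str.find nombre_norm " "
    if i = -1 then "CALLE"
    else PySem.Dict.getD pvTipoByFirstWord (PySem.Str.slice nombre_norm none (some i)) "CALLE"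

-- ===== PRECONDITION & SPEC =====
def Spec_infer_tipo_via (nombre_norm : String) (out : String) : Prop := out = infer_tipo_via_alt nombre_norm
instance (nombre_norm : String) (out : String) : Decidable (Spec_infer_tipo_via nombre_norm out) := by unfold Spec_infer_tipo_via; infer_instance

-- ===== CLAIM (what is proved, stated in full; the proofs are below) =====
def Claim_equal_infer_tipo_via : Prop := ∀ (nombre_norm : String), Dom_infer_tipo_via nombre_norm → Spec_infer_tipo_via nombre_norm (infer_tipo_via nombre_norm)

-- ===== LEMMAS AND PROOFS =====

-- a 'WORD ' prefix matches exactly when WORD is the first space-delimited word and a space exists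
lemma startswith_word_iff (l w : List Char) (hw : ' ' ∉ w) :
    (w ++ [' ']) <+: l ↔ (l.takeWhile (· ≠ ' ') = w ∧ ' ' ∈ l) := by
  induction w generalizing l with
  | nil =>
    cases l with
    | nil => simp
    | cons c t =>
      by_cases hc : c = ' '
      · subst hc
        simp [List.cons_prefix_cons]
      · simp [hc, List.cons_prefix_cons, Ne.symm hc]
  | cons a w' ih =>
    have ha : a ≠ ' ' := by intro h; exact hw (h ▸ List.mem_cons_self)
    have hw' : ' ' ∉ w' := fun h => hw (List.mem_cons_of_mem _ h)
    cases l with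
    | nil => simp
    | cons c t =>
      by_cases hc : c = ' '
      · subst hc
        simp [List.cons_prefix_cons, ha]
      · rw [List.cons_append, List.cons_prefix_cons]
        simp only [List.takeWhile_cons, hc, decide_not, ih t hw', List.mem_cons]
        constructor
        · rintro ⟨h1, h2, h3⟩
          simp [h1.symm, h2, h3]
        · rintro ⟨h1, h2⟩
          rw [if_pos (by simp)] at h1
          rcases h2 with h2 | h2
          · exact absurd h2.symm hc
          · rcases List.cons.injEq .. ▸ h1 with ⟨hl, hr⟩
            exact ⟨(by simpa using hl : c = a).symm, by simp [hr], h2⟩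

-- a singleton is a prefix exactly of a list whose head it is
lemma singleton_prefix_iff_head? (a : Char) (xs : List Char) :
    [a] <+: xs ↔ xs.head? = some a := by
  cases xs <;> simp [List.cons_prefix_cons, eq_comm]

-- when a space occurs, find points at the end of the first word
lemma find_space_take (l : List Char) (hsp : ' ' ∈ l) :
    0 ≤ PySem.Chars.find l [' '] ∧
      l.take (PySem.Chars.find l [' ']).toNat = l.takeWhile (· ≠ ' ') := by
  have h0 : 0 ≤ PySem.Chars.find l [' '] :=
    (PySem.Chars.find_nonneg_iff l [' ']).mpr ((List.singleton_infix_iff ' ' l).mpr hsp)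
  refine ⟨h0, ?_⟩
  obtain ⟨hpref, hmin⟩ := PySem.Chars.find_spec h0
  set n := (PySem.Chars.find l [' ']).toNat with hn
  have key : ∀ i : Nat, ([' '] <+: l.drop i ↔ l[i]? = some ' ') := by
    intro i
    rw [singleton_prefix_iff_head?, List.head?_drop]
  have hgn : l[n]? = some ' ' := (key n).mp hpref
  have hnlen : n < l.length := by
    rcases List.getElem?_eq_some_iff.mp hgn with ⟨h, _⟩
    exact h
  have hidx : List.findIdx (fun c => decide (c = ' ')) l = n := by
    rw [List.findIdx_eq hnlen]
    constructor
    · rcases List.getElem?_eq_some_iff.mp hgn with ⟨h, he⟩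
      simp [he]
    · intro j hj
      have hne := (key j).not.mp (hmin j hj)
      have hjlen : j < l.length := by omega
      rw [List.getElem?_eq_getElem hjlen] at hne
      simp only [decide_eq_false_iff_not]
      intro hc
      exact hne (by simp [hc])
  rw [List.takeWhile_eq_take_findIdx_not]
  congr 1
  rw [← hidx]
  congr 1
  funext c
  simp

-- the dict lookup of B, written out key by key
lemma getD_firstWord (w : List Char) :
    PySem.Dict.getD pvTipoByFirstWord (String.ofList w) "CALLE" =
      if w = "AVENIDA".toList then "AVENIDA"
      else if w = "PASAJE".toList then "PASAJE"
      else if w = "BOULEVARD".toList then "BOULEVARD"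
      else if w = "CAMINO".toList then "CAMINO"
      else if w = "RUTA".toList then "RUTA"
      else if w = "DIAGONAL".toList then "DIAGONAL"
      else if w = "CALLE".toList then "CALLE"
      else "CALLE" := by
  have hbeq : ∀ (t : String), (t == String.ofList w) = decide (w = t.toList) := by
    intro t
    by_cases h : w = t.toList
    · have : String.ofList w = t := String.ext_iff.mpr (by simp [h])
      simp [h]
    · have hne : String.ofList w ≠ t := fun he => h (by simpa using congrArg String.toList he)
      simp [h, beq_eq_false_iff_ne, Ne.symm hne]
  have hitems : pvTipoByFirstWord.items =
      [("AVENIDA", "AVENIDA"), ("PASAJE", "PASAJE"), ("BOULEVARD", "BOULEVARD"),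
       ("CAMINO", "CAMINO"), ("RUTA", "RUTA"), ("DIAGONAL", "DIAGONAL"), ("CALLE", "CALLE")] := by
    decide
  simp only [PySem.Dict.getD, PySem.Dict.get?, hitems, List.find?, hbeq]
  split_ifs <;> simp_all

-- ===== VERDICT (by name: the statement is the Claim_ definition above) =====
set_option maxHeartbeats 1000000 in
theorem infer_tipo_via_spec : Claim_equal_infer_tipo_via := by
  intro s _
  unfold Spec_infer_tipo_via
  by_cases h0 : PySem.Str.len s = 0
  · have hs : s = "" := by
      have := h0
      simp at this
      exact this
    subst hs
    decide
  · by_cases hsp : ' ' ∈ s.toList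
    · -- a space occurs: B looks up the first word; A's scan returns the same tipo
      have hb : PySem.Str.find s " " = PySem.Chars.find s.toList [' '] := by simp
      have hfpos : 0 ≤ PySem.Str.find s " " := by
        rw [hb]; exact (find_space_take s.toList hsp).1
      have hslice : PySem.Str.slice s none (some (PySem.Str.find s " ")) =
          String.ofList (s.toList.takeWhile (· ≠ ' ')) := by
        rw [String.ext_iff, PySem.Str.toList_slice]
        simp only [PySem.Chars.slice_eq_listSlice, String.toList_ofList]
        rw [PySem.List.slice_to, hb]
        · exact (find_space_take s.toList hsp).2
        · exact hfpos
      have hA : ∀ (P W : String), P.toList = W.toList ++ [' '] → ' ' ∉ W.toList →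
          (PySem.Str.startswith s P = true ↔ s.toList.takeWhile (· ≠ ' ') = W.toList) := by
        intro P W hPW hW
        have hbr : PySem.Str.startswith s P = PySem.Chars.startswith s.toList P.toList := by simp
        rw [hbr, PySem.Chars.startswith_iff, hPW, startswith_word_iff _ _ hW]
        simp [hsp]
      have hR : ∀ (P : String), ("RUTA ".toList <+: P.toList) →
          PySem.Str.startswith s P = true → s.toList.takeWhile (· ≠ ' ') = "RUTA".toList := by
        intro P hRP h
        have hP : P.toList <+: s.toList := by
          rw [← PySem.Chars.startswith_iff]
          simpa using h
        have hpre : ("RUTA".toList ++ [' ']) <+: s.toList :=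
          List.IsPrefix.trans (by decide) (hRP.trans hP)
        exact ((startswith_word_iff s.toList "RUTA".toList (by decide)).mp hpre).1
      unfold infer_tipo_via infer_tipo_via_alt
      rw [if_neg h0, if_neg h0, if_neg (by omega : ¬ PySem.Str.find s " " = -1)]
      rw [hslice, getD_firstWord]
      simp only [pvScanA, pvPrefixes]
      set w := s.toList.takeWhile (fun x => decide (x ≠ ' ')) with hgen
      by_cases c1 : w = "AVENIDA".toList
      · rw [if_pos ((hA "AVENIDA " "AVENIDA" (by decide) (by decide)).mpr c1), if_pos c1]
      · rw [if_neg (fun h => c1 ((hA "AVENIDA " "AVENIDA" (by decide) (by decide)).mp h)),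
            if_neg c1]
        by_cases c2 : w = "PASAJE".toList
        · rw [if_pos ((hA "PASAJE " "PASAJE" (by decide) (by decide)).mpr c2), if_pos c2]
        · rw [if_neg (fun h => c2 ((hA "PASAJE " "PASAJE" (by decide) (by decide)).mp h)),
              if_neg c2]
          by_cases c3 : w = "BOULEVARD".toList
          · rw [if_pos ((hA "BOULEVARD " "BOULEVARD" (by decide) (by decide)).mpr c3), if_pos c3]
          · rw [if_neg (fun h => c3 ((hA "BOULEVARD " "BOULEVARD" (by decide) (by decide)).mp h)),
                if_neg c3]
            by_cases c4 : w = "CAMINO".toList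
            · rw [if_pos ((hA "CAMINO " "CAMINO" (by decide) (by decide)).mpr c4), if_pos c4]
            · rw [if_neg (fun h => c4 ((hA "CAMINO " "CAMINO" (by decide) (by decide)).mp h)),
                  if_neg c4]
              by_cases c5 : w = "RUTA".toList
              · rw [if_pos c5]
                split_ifs <;>
                  first
                    | rfl
                    | exact absurd ((hA "RUTA " "RUTA" (by decide) (by decide)).mpr c5) ‹_›
              · rw [if_neg (fun h => c5 (hR "RUTA NACIONAL " (by decide) h)),
                    if_neg (fun h => c5 (hR "RUTA PROVINCIAL " (by decide) h)),
                    if_neg (fun h => c5 ((hA "RUTA " "RUTA" (by decide) (by decide)).mp h)),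
                    if_neg c5]
                by_cases c6 : w = "DIAGONAL".toList
                · rw [if_pos ((hA "DIAGONAL " "DIAGONAL" (by decide) (by decide)).mpr c6), if_pos c6]
                · rw [if_neg (fun h => c6 ((hA "DIAGONAL " "DIAGONAL" (by decide) (by decide)).mp h)),
                      if_neg c6]
                  by_cases c7 : w = "CALLE".toList
                  · rw [if_pos ((hA "CALLE " "CALLE" (by decide) (by decide)).mpr c7), if_pos c7]
                  · rw [if_neg (fun h => c7 ((hA "CALLE " "CALLE" (by decide) (by decide)).mp h)),
                        if_neg c7]
    · -- no space: B returns the default "CALLE" and no prefix of A can match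
      have hfind : PySem.Str.find s " " = -1 := by
        rw [PySem.Str.find_eq_neg_one_iff]
        intro hinf
        exact hsp ((List.singleton_infix_iff ' ' s.toList).mp (by simpa using hinf))
      have hcon : ∀ (P : String), ' ' ∈ P.toList → PySem.Str.startswith s P = true → False := by
        intro P hP h
        have hpre : P.toList <+: s.toList := by
          rw [← PySem.Chars.startswith_iff]
          simpa using h
        exact hsp (hpre.sublist.mem hP)
      unfold infer_tipo_via infer_tipo_via_alt
      rw [if_neg h0, if_neg h0, if_pos hfind]
      simp only [pvScanA, pvPrefixes]
      split_ifs with h1 h2 h3 h4 h5 h6 h7 h8 h9 <;>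
        first
          | rfl
          | exact absurd ‹_› (fun h => hcon _ (by decide) h)
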